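-- pv_equiv track=rewrite | github.com/ivan-wize/python-data-structures-practice | AppleDevOps/OtherProblemSolutions.py | canary_decision
-- ===== SOURCE A (Python) =====
-- def canary_decision(metrics: dict, thresholds: dict) -> str:
--     # missing metric -> conservative hold
--     for k in thresholds:
--         if k not in metrics:
--             return "hold"
--     big_miss = any(metrics[k] > 1.2 * thresholds[k] for k in thresholds)
--     if big_miss:
--         return "rollback"
--     all_ok = all(metrics[k] <= thresholds[k] for k in thresholds)
--     if all_ok:
--         return "promote"
--     return "hold"
-- ===== SOURCE B (Python) =====
-- def canary_decision(metrics: dict, thresholds: dict) -> str: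
--     # one pass over thresholds with three flags instead of three scans;
--     # 5*m > 6*t is the exact integer form of m > 1.2*t for |t| <= 2**31
--     missing = False
--     big_miss = False
--     all_ok = True
--     for k in thresholds:
--         if k not in metrics:
--             missing = True
--             continue
--         m = metrics[k]
--         t = thresholds[k]
--         if 5 * m > 6 * t:
--             big_miss = True
--         if m > t:
--             all_ok = False
--     if missing:
--         return "hold"
--     if big_miss:
--         return "rollback"
--     return "promote" if all_ok else "hold"
-- ===== Notes on version B (the rewrite author's own statement) =====
-- stated objective: alternative
-- what changed: Three separate scans over thresholds (membership scan, any() for big misses, all() for ok) become one loop maintaining three flags with the decision priority applied once at the end, and the float comparison m > 1.2*t is replaced by the exact integer test 5*m > 6*t.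
import Mathlib
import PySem

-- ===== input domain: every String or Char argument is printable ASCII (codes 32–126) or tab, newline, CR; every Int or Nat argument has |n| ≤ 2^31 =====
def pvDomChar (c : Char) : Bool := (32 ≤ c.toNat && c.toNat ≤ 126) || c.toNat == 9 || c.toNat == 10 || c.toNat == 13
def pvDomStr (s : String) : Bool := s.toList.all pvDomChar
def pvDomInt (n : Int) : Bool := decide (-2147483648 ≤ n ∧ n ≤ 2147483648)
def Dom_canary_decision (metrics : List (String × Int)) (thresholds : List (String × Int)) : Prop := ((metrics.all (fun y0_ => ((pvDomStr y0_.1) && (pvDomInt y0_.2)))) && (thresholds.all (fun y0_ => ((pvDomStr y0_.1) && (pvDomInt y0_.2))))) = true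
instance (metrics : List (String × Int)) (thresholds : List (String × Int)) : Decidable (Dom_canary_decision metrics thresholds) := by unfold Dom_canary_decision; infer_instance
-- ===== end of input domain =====

-- B folds thresholds once with three flags instead of A's three scans; return value proved equal.

-- ===== PORT A =====
-- dict lookup on the association list: first match (python `d[k]` / `k in d`)
def pvLookup (d : List (String × Int)) (k : String) : Option Int :=
  (d.find? (fun p => p.1 == k)).map Prod.snd

-- Port of A. `m > 1.2 * t` is ported as `5 * m > 6 * t`: for |t| ≤ 2^31 the Python float
-- comparison of an int against 1.2*t is exact in this form (the double rounding error of
-- 1.2*t is below half an ulp at the only integer boundary 5m = 6t), checked against CPython.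
-- `metrics[k]` in the any/all generators is unreachable when the key is missing (the first
-- loop has returned "hold"), so `.getD 0` there is never the `none` case on reached inputs.
def canary_decision (metrics : List (String × Int)) (thresholds : List (String × Int)) : String :=
  -- for k in thresholds: if k not in metrics: return "hold"
  if thresholds.any (fun kv => (pvLookup metrics kv.1).isNone) then "hold"
  else
    -- big_miss = any(metrics[k] > 1.2 * thresholds[k] for k in thresholds)
    let big_miss := thresholds.any (fun kv =>
      decide (5 * (pvLookup metrics kv.1).getD 0 > 6 * (pvLookup thresholds kv.1).getD 0))
    if big_miss then "rollback"
    else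
      -- all_ok = all(metrics[k] <= thresholds[k] for k in thresholds)
      let all_ok := thresholds.all (fun kv =>
        decide ((pvLookup metrics kv.1).getD 0 ≤ (pvLookup thresholds kv.1).getD 0))
      if all_ok then "promote" else "hold"

-- ===== PORT B =====
-- single pass over thresholds maintaining (missing, big_miss, all_ok)
def canary_decision_alt (metrics : List (String × Int)) (thresholds : List (String × Int)) : String :=
  let s := thresholds.foldl (fun (s : Bool × Bool × Bool) kv =>
    match pvLookup metrics kv.1 with
    | none => (true, s.2.1, s.2.2)      -- missing = True; continue
    | some m =>
      let t := (pvLookup thresholds kv.1).getD 0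
      (s.1, s.2.1 || decide (5 * m > 6 * t), s.2.2 && !decide (m > t)))
    (false, false, true)
  if s.1 then "hold"
  else if s.2.1 then "rollback"
  else if s.2.2 then "promote" else "hold"

-- ===== PRECONDITION & SPEC =====
def Spec_canary_decision (metrics : List (String × Int)) (thresholds : List (String × Int)) (out : String) : Prop := out = canary_decision_alt metrics thresholds
instance (metrics : List (String × Int)) (thresholds : List (String × Int)) (out : String) : Decidable (Spec_canary_decision metrics thresholds out) := by unfold Spec_canary_decision; infer_instance

-- ===== CLAIM (what is proved, stated in full; the proofs are below) =====
def Claim_equal_canary_decision : Prop := ∀ (metrics : List (String × Int)) (thresholds : List (String × Int)), Dom_canary_decision metrics thresholds → Spec_canary_decision metrics thresholds (canary_decision metrics thresholds)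

-- ===== LEMMAS AND PROOFS =====

-- characterisation of B's single fold: each flag is the corresponding scan
theorem pvFold_char (metrics thresholds : List (String × Int))
    (l : List (String × Int)) (s : Bool × Bool × Bool) :
    l.foldl (fun (s : Bool × Bool × Bool) kv =>
      match pvLookup metrics kv.1 with
      | none => (true, s.2.1, s.2.2)
      | some m =>
        let t := (pvLookup thresholds kv.1).getD 0
        (s.1, s.2.1 || decide (5 * m > 6 * t), s.2.2 && !decide (m > t))) s
    = (s.1 || l.any (fun kv => (pvLookup metrics kv.1).isNone),
       s.2.1 || l.any (fun kv => (pvLookup metrics kv.1).isSome &&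
         decide (5 * (pvLookup metrics kv.1).getD 0 > 6 * (pvLookup thresholds kv.1).getD 0)),
       s.2.2 && l.all (fun kv => (pvLookup metrics kv.1).isNone ||
         !decide ((pvLookup metrics kv.1).getD 0 > (pvLookup thresholds kv.1).getD 0))) := by
  induction l generalizing s with
  | nil => simp
  | cons kv rest ih =>
    simp only [List.foldl_cons, List.any_cons, List.all_cons]
    cases h : pvLookup metrics kv.1 with
    | none => simp [ih]
    | some m => simp [ih, Bool.or_assoc, Bool.and_assoc]

-- ===== VERDICT (by name: the statement is the Claim_ definition above) =====
theorem canary_decision_spec : Claim_equal_canary_decision := by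
  intro metrics thresholds _
  unfold Spec_canary_decision canary_decision canary_decision_alt
  rw [pvFold_char]
  simp only [Bool.false_or, Bool.true_and]
  by_cases hmiss : thresholds.any (fun kv => (pvLookup metrics kv.1).isNone) = true
  · simp [hmiss]
  · have hall : ∀ kv ∈ thresholds, (pvLookup metrics kv.1).isNone = false := by
      intro kv hkv
      by_contra h
      exact hmiss (List.any_eq_true.mpr ⟨kv, hkv, by simpa using h⟩)
    simp only [hmiss]
    have hbig : (thresholds.any fun kv => (pvLookup metrics kv.1).isSome &&
         decide (5 * (pvLookup metrics kv.1).getD 0 > 6 * (pvLookup thresholds kv.1).getD 0))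
        = (thresholds.any fun kv =>
         decide (5 * (pvLookup metrics kv.1).getD 0 > 6 * (pvLookup thresholds kv.1).getD 0)) := by
      rw [Bool.eq_iff_iff, List.any_eq_true, List.any_eq_true]
      constructor
      · rintro ⟨kv, hkv, hc⟩
        exact ⟨kv, hkv, ((Bool.and_eq_true _ _).mp hc).2⟩
      · rintro ⟨kv, hkv, hc⟩
        have h1 := hall kv hkv
        rw [Option.isNone_eq_false_iff, Option.isSome_iff_ne_none] at h1
        exact ⟨kv, hkv, by simp [Option.isSome_iff_ne_none, h1, hc]⟩
    have hok : (thresholds.all fun kv => (pvLookup metrics kv.1).isNone ||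
         !decide ((pvLookup metrics kv.1).getD 0 > (pvLookup thresholds kv.1).getD 0))
        = (thresholds.all fun kv =>
         decide ((pvLookup metrics kv.1).getD 0 ≤ (pvLookup thresholds kv.1).getD 0)) := by
      rw [Bool.eq_iff_iff, List.all_eq_true, List.all_eq_true]
      constructor
      · intro h kv hkv
        have h1 := hall kv hkv
        have h2 := h kv hkv
        rw [h1, Bool.false_or] at h2
        simpa [Int.not_lt] using h2
      · intro h kv hkv
        have h2 := h kv hkv
        rw [hall kv hkv, Bool.false_or]
        simpa [Int.not_lt] using h2
    rw [hbig, hok]
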